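-- pv_equiv track=rewrite | github.com/ruth-hanna/base-editor-screen-analysis | base_edit_functions.py | get_most_severe_consequence
-- ===== SOURCE A (Python) =====
-- def get_most_severe_consequence(string):
--     consequence_list = ['splice_acceptor_variant',
--                         'splice_donor_variant',
--                         'stop_gained',
--                         'frameshift_variant',
--                         'stop_lost',
--                         'start_lost',
--                         'transcript_amplification',
--                         'inframe_insertion',
--                         'inframe_deletion',
--                         'missense_variant',
--                         'protein_altering_variant',
--                         'splice_region_variant',
--                         'incomplete_terminal_codon_variant',
--                         'start_retained_variant',
--                         'stop_retained_variant',
--                         'synonymous_variant',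
--                         'coding_sequence_variant',
--                         'mature_miRNA_variant',
--                         '5_prime_UTR_variant',
--                         '3_prime_UTR_variant',
--                         'non_coding_transcript_exon_variant',
--                         'intron_variant',
--                         'NMD_transcript_variant',
--                         'non_coding_transcript_variant',
--                         'upstream_gene_variant',
--                         'downstream_gene_variant',
--                         'TFBS_ablation',
--                         'TFBS_amplification',
--                         'TF_binding_site_variant',
--                         'regulatory_region_ablation',
--                         'regulatory_region_amplification',
--                         'feature_elongation',
--                         'regulatory_region_variant',
--                         'feature_truncation',
--                         'intergenic_variant']
--     if type(string) == float:
--         return 'None'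
--     type_list = string.split(',')
--     for consequence in consequence_list:
--         if consequence in type_list:
--             return consequence
-- ===== SOURCE B (Python) =====
-- def get_most_severe_consequence(string):
--     consequence_list = ['splice_acceptor_variant',
--                         'splice_donor_variant',
--                         'stop_gained',
--                         'frameshift_variant',
--                         'stop_lost',
--                         'start_lost',
--                         'transcript_amplification',
--                         'inframe_insertion',
--                         'inframe_deletion',
--                         'missense_variant',
--                         'protein_altering_variant',
--                         'splice_region_variant',
--                         'incomplete_terminal_codon_variant',
--                         'start_retained_variant',
--                         'stop_retained_variant',
--                         'synonymous_variant',
--                         'coding_sequence_variant',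
--                         'mature_miRNA_variant',
--                         '5_prime_UTR_variant',
--                         '3_prime_UTR_variant',
--                         'non_coding_transcript_exon_variant',
--                         'intron_variant',
--                         'NMD_transcript_variant',
--                         'non_coding_transcript_variant',
--                         'upstream_gene_variant',
--                         'downstream_gene_variant',
--                         'TFBS_ablation',
--                         'TFBS_amplification',
--                         'TF_binding_site_variant',
--                         'regulatory_region_ablation',
--                         'regulatory_region_amplification',
--                         'feature_elongation',
--                         'regulatory_region_variant',
--                         'feature_truncation',
--                         'intergenic_variant']
--     if type(string) == float:
--         return 'None'
--     priority = {c: i for i, c in enumerate(consequence_list)}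
--     best = None
--     for item in string.split(','):
--         i = priority.get(item)
--         if i is not None and (best is None or i < best[0]):
--             best = (i, item)
--     return best[1] if best is not None else None
-- ===== Notes on version B (the rewrite author's own statement) =====
-- stated objective: alternative
-- what changed: Replaces A's scan over the 35-element priority list with membership tests against the split items by a dict of priorities built once and a single pass over the split items keeping the best-so-far (lowest priority index) match.
import Mathlib
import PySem

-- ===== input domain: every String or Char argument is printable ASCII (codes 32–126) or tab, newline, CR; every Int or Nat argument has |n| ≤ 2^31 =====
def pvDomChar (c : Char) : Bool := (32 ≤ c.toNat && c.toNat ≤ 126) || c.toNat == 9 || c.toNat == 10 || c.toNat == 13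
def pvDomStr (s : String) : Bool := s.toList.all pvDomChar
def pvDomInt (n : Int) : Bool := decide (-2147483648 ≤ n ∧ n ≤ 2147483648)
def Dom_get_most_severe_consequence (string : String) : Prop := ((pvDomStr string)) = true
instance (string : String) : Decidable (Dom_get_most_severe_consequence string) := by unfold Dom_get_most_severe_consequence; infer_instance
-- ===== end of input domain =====

-- B replaces A's scan over the priority list (membership test per entry) by a priority dict built
-- once and a single best-so-far pass over the split items; same cost class, different traversal.
-- (Python A's 'type(string) == float' guard is unreachable for a str argument — the Lean argument
-- is a String — so neither port carries it.)

-- ===== PORT A =====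
def pvConsequenceList : List String :=
  ["splice_acceptor_variant", "splice_donor_variant", "stop_gained", "frameshift_variant",
   "stop_lost", "start_lost", "transcript_amplification", "inframe_insertion",
   "inframe_deletion", "missense_variant", "protein_altering_variant", "splice_region_variant",
   "incomplete_terminal_codon_variant", "start_retained_variant", "stop_retained_variant",
   "synonymous_variant", "coding_sequence_variant", "mature_miRNA_variant",
   "5_prime_UTR_variant", "3_prime_UTR_variant", "non_coding_transcript_exon_variant",
   "intron_variant", "NMD_transcript_variant", "non_coding_transcript_variant",
   "upstream_gene_variant", "downstream_gene_variant", "TFBS_ablation", "TFBS_amplification",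
   "TF_binding_site_variant", "regulatory_region_ablation", "regulatory_region_amplification",
   "feature_elongation", "regulatory_region_variant", "feature_truncation", "intergenic_variant"]

-- the 'for consequence in consequence_list: if consequence in type_list: return consequence' loop
def pvFindA : List String → List String → Option String
  | [], _ => none
  | c :: rest, tl => if tl.contains c then some c else pvFindA rest tl

def get_most_severe_consequence (string : String) : Option String :=
  let type_list := (PySem.Str.split? string ",").getD []   -- sep "," ≠ "", never none
  pvFindA pvConsequenceList type_list

-- ===== PORT B =====
-- priority = {c: i for i, c in enumerate(consequence_list)}
def pvPriority : PySem.Dict String Int :=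
  (PySem.List.enumerate pvConsequenceList 0).foldl (fun d p => d.insert p.2 p.1) PySem.Dict.empty

-- loop body: keep the (index, item) pair with the smallest priority index
def pvBestStep (best : Option (Int × String)) (item : String) : Option (Int × String) :=
  match pvPriority.get? item with
  | none => best
  | some i =>
    match best with
    | none => some (i, item)
    | some (j, _) => if i < j then some (i, item) else best

def get_most_severe_consequence_alt (string : String) : Option String :=
  let items := (PySem.Str.split? string ",").getD []
  match items.foldl pvBestStep none with
  | some (_, item) => some item
  | none => none

-- ===== PRECONDITION & SPEC =====
def Spec_get_most_severe_consequence (string : String) (out : Option String) : Prop := out = get_most_severe_consequence_alt string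
instance (string : String) (out : Option String) : Decidable (Spec_get_most_severe_consequence string out) := by unfold Spec_get_most_severe_consequence; infer_instance

-- ===== CLAIM (what is proved, stated in full; the proofs are below) =====
def Claim_equal_get_most_severe_consequence : Prop := ∀ (string : String), Dom_get_most_severe_consequence string → Spec_get_most_severe_consequence string (get_most_severe_consequence string)

-- ===== LEMMAS AND PROOFS =====

-- left-biased "min by priority index" of two candidates; pvBestStep folds with it
def pvMerge : Option (Int × String) → Option (Int × String) → Option (Int × String)
  | b, none => b
  | none, some p => some p
  | some (j, y), some (i, z) => if i < j then some (i, z) else some (j, y)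

def pvLook (a : String) : Option (Int × String) :=
  (pvPriority.get? a).map (fun i => (i, a))

theorem pvBestStep_eq_merge (b : Option (Int × String)) (a : String) :
    pvBestStep b a = pvMerge b (pvLook a) := by
  unfold pvBestStep pvLook pvMerge
  cases pvPriority.get? a <;> cases b <;> simp

theorem pvMerge_none_left (x : Option (Int × String)) : pvMerge none x = x := by
  cases x <;> rfl

theorem pvMerge_assoc (a b c : Option (Int × String)) :
    pvMerge (pvMerge a b) c = pvMerge a (pvMerge b c) := by
  rcases a with _ | ⟨ja, xa⟩ <;> rcases b with _ | ⟨jb, xb⟩ <;> rcases c with _ | ⟨jc, xc⟩ <;>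
    try rfl
  all_goals simp only [pvMerge]
  all_goals split_ifs <;> (try simp only [pvMerge]) <;> split_ifs <;>
    first | rfl | (exfalso; omega)

def pvFindI : List String → List String → Int → Option (Int × String)
  | [], _, _ => none
  | c :: rest, tl, k => if tl.contains c then some (k, c) else pvFindI rest tl (k + 1)

theorem pvFindI_ge (cs tl : List String) (k : Int) (p : Int × String)
    (h : pvFindI cs tl k = some p) : k ≤ p.1 := by
  induction cs generalizing k with
  | nil => simp [pvFindI] at h
  | cons c rest ih =>
    simp only [pvFindI] at h
    split_ifs at h with hc
    · cases h; simp
    · have := ih (k + 1) h; omega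

def pvLookI (cs : List String) (a : String) (k : Int) : Option (Int × String) :=
  (PySem.List.index? cs a).map (fun n : Nat => ((k + (n : Int) : Int), a))

theorem pvFindI_cons (cs : List String) (a : String) (tl : List String) (k : Int) :
    pvFindI cs (a :: tl) k = pvMerge (pvLookI cs a k) (pvFindI cs tl k) := by
  induction cs generalizing k with
  | nil => simp [pvFindI, pvLookI, pvMerge]
  | cons c rest ih =>
    by_cases hca : c = a
    · subst hca
      have hl : pvFindI (c :: rest) (c :: tl) k = some (k, c) := by
        simp [pvFindI]
      rw [hl, pvLookI, PySem.List.index?_cons_self]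
      simp only [Option.map_some, Nat.cast_zero, add_zero]
      rcases hrest : pvFindI (c :: rest) tl k with _ | ⟨i, x⟩
      · rfl
      · have hk : k ≤ i := by simpa using pvFindI_ge _ _ _ _ hrest
        simp only [pvMerge]
        rw [if_neg (by omega)]
    · rw [pvLookI, PySem.List.index?_cons_of_ne _ hca]
      by_cases hctl : c ∈ tl
      · have hl : pvFindI (c :: rest) (a :: tl) k = some (k, c) := by
          simp [pvFindI, hctl]
        have hr : pvFindI (c :: rest) tl k = some (k, c) := by
          simp [pvFindI, hctl]
        rw [hl, hr]
        rcases hidx : PySem.List.index? rest a with _ | n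
        · rfl
        · simp only [Option.map_some, pvMerge]
          rw [if_pos (by push_cast; omega)]
      · have hl : pvFindI (c :: rest) (a :: tl) k = pvFindI rest (a :: tl) (k + 1) := by
          simp [pvFindI, hctl, hca]
        have hr : pvFindI (c :: rest) tl k = pvFindI rest tl (k + 1) := by
          simp [pvFindI, hctl]
        rw [hl, hr, ih (k + 1)]
        congr 1
        rcases hidx : PySem.List.index? rest a with _ | n
        · rw [pvLookI, hidx]; simp
        · simp only [pvLookI, hidx, Option.map_some]
          congr 2
          push_cast
          ring

theorem get?_prioFold : ∀ (l : List String), l.Nodup → ∀ (s : Int) (d : PySem.Dict String Int) (c : String),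
    ((PySem.List.enumerate l s).foldl (fun d p => d.insert p.2 p.1) d).get? c
      = match PySem.List.index? l c with
        | some n => some (s + (n : Int))
        | none => d.get? c := by
  intro l
  induction l with
  | nil => intro _ s d c; simp [PySem.List.enumerate_nil]
  | cons x l ih =>
    intro h s d c
    rcases List.nodup_cons.mp h with ⟨hx, hnd⟩
    rw [PySem.List.enumerate_cons]
    simp only [List.foldl_cons]
    by_cases hxc : x = c
    · subst hxc
      rw [ih hnd, PySem.List.index?_cons_self,
        show PySem.List.index? l x = none from (PySem.List.index?_eq_none_iff _ _).mpr hx]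
      simp [PySem.Dict.get?_insert_self]
    · rw [ih hnd, PySem.List.index?_cons_of_ne _ hxc]
      rcases hidx : PySem.List.index? l c with _ | n
      · simp [PySem.Dict.get?_insert_of_ne d s (Ne.symm hxc)]
      · simp only [Option.map_some]
        congr 1
        push_cast
        ring

theorem pvConsequenceList_nodup : pvConsequenceList.Nodup := by decide

theorem pvLook_eq_lookI (a : String) : pvLook a = pvLookI pvConsequenceList a 0 := by
  unfold pvLook pvLookI pvPriority
  rw [get?_prioFold _ pvConsequenceList_nodup]
  rcases hidx : PySem.List.index? pvConsequenceList a with _ | n <;> simp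

theorem foldl_pvBestStep_shift (tl : List String) (b : Option (Int × String)) :
    tl.foldl pvBestStep b = pvMerge b (tl.foldl pvBestStep none) := by
  induction tl generalizing b with
  | nil => cases b <;> rfl
  | cons a tl ih =>
    simp only [List.foldl_cons]
    rw [ih (pvBestStep b a), ih (pvBestStep none a), pvBestStep_eq_merge,
        pvBestStep_eq_merge none a, pvMerge_none_left, pvMerge_assoc]

theorem pvFindA_eq_findI (cs tl : List String) (k : Int) :
    pvFindA cs tl = (pvFindI cs tl k).map (·.2) := by
  induction cs generalizing k with
  | nil => rfl
  | cons c rest ih =>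
    simp only [pvFindA, pvFindI]
    split_ifs
    · rfl
    · exact ih (k + 1)

theorem foldl_eq_findI (tl : List String) :
    tl.foldl pvBestStep none = pvFindI pvConsequenceList tl 0 := by
  induction tl with
  | nil => rfl
  | cons a tl ih =>
    simp only [List.foldl_cons]
    rw [foldl_pvBestStep_shift, ih, pvBestStep_eq_merge, pvMerge_none_left,
        pvLook_eq_lookI, pvFindI_cons]

-- ===== VERDICT (by name: the statement is the Claim_ definition above) =====
theorem get_most_severe_consequence_spec : Claim_equal_get_most_severe_consequence := by
  intro s _
  unfold Spec_get_most_severe_consequence get_most_severe_consequence get_most_severe_consequence_alt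
  simp only
  rw [foldl_eq_findI, pvFindA_eq_findI _ _ 0]
  rcases pvFindI pvConsequenceList ((PySem.Str.split? s ",").getD []) 0 with _ | ⟨i, x⟩ <;> rfl
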